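-- pv_equiv track=rewrite | github.com/tumblehead/TumblePipe | python/1x/tumblepipe/pipe/houdini/util.py | get_source_department
-- ===== SOURCE A (Python) =====
-- def get_source_department(inputs: list[dict], department_order: list[str]) -> str | None:
--     """
--     Find the source department (first shot department) from inputs array.
--
--     Extracts all shot department entries from inputs and returns the one
--     that appears earliest in the pipeline department order.
--
--     Args:
--         inputs: List of input dicts with 'uri' and 'department' keys
--         department_order: List of department names in pipeline order
--
--     Returns:
--         The source department name, or None if no shot entries found
--     """
--     # Extract shot department entries (URIs starting with entity:/shots/)
--     shot_depts = [
--         inp['department'] for inp in inputs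
--         if inp.get('uri', '').startswith('entity:/shots/')
--     ]
--     if not shot_depts:
--         return None
--
--     # Return the one earliest in pipeline order
--     for dept in department_order:
--         if dept in shot_depts:
--             return dept
--
--     # Fallback to first shot department found
--     return shot_depts[0]
-- ===== SOURCE B (Python) =====
-- def get_source_department(inputs: list[dict], department_order: list[str]) -> str | None:
--     shot_depts = [
--         inp['department'] for inp in inputs
--         if inp.get('uri', '').startswith('entity:/shots/')
--     ]
--     if not shot_depts:
--         return None
--
--     # Rank table: first index of each department name in pipeline order
--     rank = {}
--     for i, d in enumerate(department_order):
--         if d not in rank: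
--             rank[d] = i
--
--     # Single pass: keep the shot department with the smallest rank
--     best = None
--     best_rank = None
--     for d in shot_depts:
--         r = rank.get(d)
--         if r is not None and (best_rank is None or r < best_rank):
--             best, best_rank = d, r
--
--     return best if best is not None else shot_depts[0]
-- ===== Notes on version B (the rewrite author's own statement) =====
-- stated objective: alternative
-- what changed: Replaces A's loop over department_order with an inner membership scan of shot_depts by a first-index rank table built once and a single minimum-rank pass over shot_depts.
import Mathlib
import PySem

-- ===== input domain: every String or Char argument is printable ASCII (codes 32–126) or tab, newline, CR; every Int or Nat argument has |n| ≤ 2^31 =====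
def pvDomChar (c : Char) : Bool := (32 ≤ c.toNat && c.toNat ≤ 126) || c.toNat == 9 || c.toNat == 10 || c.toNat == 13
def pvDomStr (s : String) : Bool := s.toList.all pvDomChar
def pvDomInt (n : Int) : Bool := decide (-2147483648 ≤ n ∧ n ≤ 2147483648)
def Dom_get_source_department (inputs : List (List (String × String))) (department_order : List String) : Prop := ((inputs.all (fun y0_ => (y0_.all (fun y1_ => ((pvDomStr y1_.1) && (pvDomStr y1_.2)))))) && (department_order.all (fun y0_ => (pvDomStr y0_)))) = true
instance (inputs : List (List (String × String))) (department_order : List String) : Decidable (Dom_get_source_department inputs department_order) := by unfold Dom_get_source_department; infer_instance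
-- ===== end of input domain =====

-- B replaces A's loop over department_order with an inner membership scan by a
-- first-index rank table plus one minimum-rank pass over the shot departments.

-- ===== PORT A =====
-- the list comprehension shared verbatim by A and B: inp['department'] for shot-uri inputs;
-- none = the KeyError Python raises when such an inp lacks 'department' (excluded by Pre_)
def pvShotDepts? (inputs : List (List (String × String))) : Option (List String) :=
  match inputs with
  | [] => some []
  | inp :: rest =>
    if PySem.Str.startswith (PySem.Dict.getD (PySem.Dict.mk inp) "uri" "") "entity:/shots/" then
      match (PySem.Dict.mk inp).get? "department", pvShotDepts? rest with
      | some d, some t => some (d :: t)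
      | _, _ => none
    else pvShotDepts? rest

-- A's loop: for dept in department_order: if dept in shot_depts: return dept; fallback shot_depts[0]
def pvFindFirst : List String → List String → Option String
  | [], sd => sd.head?
  | d :: rest, sd => if sd.contains d then some d else pvFindFirst rest sd

def get_source_department (inputs : List (List (String × String))) (department_order : List String) : Option String :=
  match pvShotDepts? inputs with
  | none => none
  | some shot_depts =>
    if shot_depts.isEmpty then none
    else pvFindFirst department_order shot_depts

-- ===== PORT B =====
-- rank = {}; for i, d in enumerate(department_order): if d not in rank: rank[d] = i
def pvRank (department_order : List String) : PySem.Dict String Int :=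
  (PySem.List.enumerate department_order).foldl
    (fun r p => if r.contains p.2 then r else r.insert p.2 p.1) PySem.Dict.empty

-- the scan state (best, best_rank) and its update, as in Source B's loop body
def pvBestStep (rank : PySem.Dict String Int) (st : Option String × Option Int) (d : String) :
    Option String × Option Int :=
  match rank.get? d with
  | none => st
  | some r =>
    match st.2 with
    | none => (some d, some r)
    | some br => if r < br then (some d, some r) else st

def get_source_department_alt (inputs : List (List (String × String))) (department_order : List String) : Option String :=
  match pvShotDepts? inputs with
  | none => none
  | some shot_depts =>
    if shot_depts.isEmpty then none
    else
      let rank := pvRank department_order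
      match (shot_depts.foldl (pvBestStep rank) (none, none)).1 with
      | some b => some b
      | none => shot_depts.head?

-- ===== PRECONDITION & SPEC =====
-- Pre_ excludes exactly the inputs where A raises KeyError: an input dict whose uri starts
-- with 'entity:/shots/' but which has no 'department' key (B raises the same KeyError there).
def Pre_get_source_department (inputs : List (List (String × String))) (department_order : List String) : Prop :=
  ∀ inp ∈ inputs,
    PySem.Str.startswith (PySem.Dict.getD (PySem.Dict.mk inp) "uri" "") "entity:/shots/" = true →
    ((PySem.Dict.mk inp).get? "department").isSome = true
instance (inputs : List (List (String × String))) (department_order : List String) : Decidable (Pre_get_source_department inputs department_order) := by unfold Pre_get_source_department; infer_instance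

def pvWitness_get_source_department : (List (List (String × String))) × List String :=
  ([[("uri", "entity:/shots/sq010"), ("department", "anim")],
    [("uri", "entity:/assets/tree"), ("department", "mod")]],
   ["mod", "anim", "fx"])

def Spec_get_source_department (inputs : List (List (String × String))) (department_order : List String) (out : Option String) : Prop := out = get_source_department_alt inputs department_order
instance (inputs : List (List (String × String))) (department_order : List String) (out : Option String) : Decidable (Spec_get_source_department inputs department_order out) := by unfold Spec_get_source_department; infer_instance

-- ===== CLAIM (what is proved, stated in full; the proofs are below) =====
def Claim_equal_get_source_department : Prop := ∀ (inputs : List (List (String × String))) (department_order : List String), Dom_get_source_department inputs department_order → Pre_get_source_department inputs department_order → Spec_get_source_department inputs department_order (get_source_department inputs department_order)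

-- ===== LEMMAS AND PROOFS =====

-- Pre_ means the shared extraction succeeds
lemma shotDepts_isSome (inputs : List (List (String × String)))
    (h : Pre_get_source_department inputs []) : (pvShotDepts? inputs).isSome := by
  induction inputs with
  | nil => simp [pvShotDepts?]
  | cons inp rest ih =>
    have hrest : (pvShotDepts? rest).isSome :=
      ih (fun i hi => h i (List.mem_cons_of_mem _ hi))
    simp only [pvShotDepts?]
    split
    · rename_i hs
      have := h inp (List.mem_cons_self) hs
      cases hd : (PySem.Dict.mk inp).get? "department" with
      | none => simp [hd] at this
      | some d =>
        cases ht : pvShotDepts? rest with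
        | none => simp [ht] at hrest
        | some t => simp
    · exact hrest

-- the rank-building fold looks up the FIRST index (offset by the start) of d
lemma rank_aux (order : List String) :
    ∀ (s : Int) (r : PySem.Dict String Int) (d : String),
    ((PySem.List.enumerate order s).foldl
        (fun r p => if r.contains p.2 then r else r.insert p.2 p.1) r).get? d =
      match r.get? d with
      | some v => some v
      | none => (PySem.List.index? order d).map (fun n => s + (n : Int)) := by
  induction order with
  | nil =>
    intro s r d
    simp only [PySem.List.enumerate_nil, List.foldl_nil]
    cases r.get? d with
    | none => simp [PySem.List.index?]
    | some v => simp
  | cons h t ih =>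
    intro s r d
    rw [PySem.List.enumerate_cons]
    simp only [List.foldl_cons]
    by_cases hc : r.contains h
    · simp only [hc, if_true]
      rw [ih]
      by_cases hhd : h = d
      · subst hhd
        have hs : (r.get? h).isSome := by rw [← PySem.Dict.contains_eq_isSome_get?]; exact hc
        cases hr : r.get? h with
        | none => simp [hr] at hs
        | some v => simp
      · cases hr : r.get? d with
        | some v => simp
        | none =>
          simp only
          rw [PySem.List.index?_cons_of_ne t hhd]
          cases PySem.List.index? t d with
          | none => simp
          | some n => simp; omega
    · simp only [hc, Bool.false_eq_true, if_false]
      rw [ih]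
      by_cases hhd : h = d
      · subst hhd
        have hr : r.get? h = none := by
          rw [PySem.Dict.get?_eq_none_iff_contains]
          exact Bool.eq_false_iff.mpr hc
        rw [PySem.Dict.get?_insert_self, hr]
        simp only
        rw [PySem.List.index?_cons_self]
        simp
      · rw [PySem.Dict.get?_insert_of_ne r s (fun e => hhd e.symm)]
        cases hr : r.get? d with
        | some v => simp
        | none =>
          simp only
          rw [PySem.List.index?_cons_of_ne t hhd]
          cases PySem.List.index? t d with
          | none => simp
          | some n => simp; omega

-- the rank dict is first-index lookup in department_order
lemma rank_get (order : List String) (d : String) :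
    (pvRank order).get? d = (PySem.List.index? order d).map (fun n => (n : Int)) := by
  have := rank_aux order 0 PySem.Dict.empty d
  simp only [PySem.Dict.get?_empty] at this
  rw [pvRank, this]
  cases PySem.List.index? order d <;> simp

-- invariant of B's minimum-rank pass over the shot departments
def pvInv (order seen : List String) (st : Option String × Option Int) : Prop :=
  (st = (none, none) ∧ ∀ x ∈ seen, x ∉ order) ∨
  (∃ b nb, st = (some b, some ((nb : Nat) : Int)) ∧ b ∈ seen ∧
    PySem.List.index? order b = some nb ∧
    ∀ e ∈ seen, ∀ ne, PySem.List.index? order e = some ne → nb ≤ ne)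

lemma best_step_inv (order seen : List String) (st : Option String × Option Int)
    (d : String) (h : pvInv order seen st) :
    pvInv order (seen ++ [d]) (pvBestStep (pvRank order) st d) := by
  unfold pvBestStep
  rw [rank_get]
  cases hd : PySem.List.index? order d with
  | none =>
    have hdno : d ∉ order := (PySem.List.index?_eq_none_iff order d).mp hd
    show pvInv order (seen ++ [d]) (match (none : Option Int) with | none => st | some r => match st.2 with | none => (some d, some r) | some br => if r < br then (some d, some r) else st)
    rcases h with ⟨hst, hall⟩ | ⟨b, nb, hst, hb, hib, hmin⟩
    · exact Or.inl ⟨hst, by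
        intro x hx
        rcases List.mem_append.mp hx with hx | hx
        · exact hall x hx
        · simp at hx; subst hx; exact hdno⟩
    · exact Or.inr ⟨b, nb, hst, List.mem_append_left _ hb, hib, by
        intro e he ne hne
        rcases List.mem_append.mp he with he | he
        · exact hmin e he ne hne
        · simp at he; subst he; rw [hd] at hne; cases hne⟩
  | some nd =>
    show pvInv order (seen ++ [d]) (match (some (nd:Int) : Option Int) with | none => st | some r => match st.2 with | none => (some d, some r) | some br => if r < br then (some d, some r) else st)
    rcases h with ⟨hst, hall⟩ | ⟨b, nb, hst, hb, hib, hmin⟩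
    · rw [hst]
      simp only
      exact Or.inr ⟨d, nd, rfl, List.mem_append_right _ (List.mem_singleton.mpr rfl), hd, by
        intro e he ne hne
        rcases List.mem_append.mp he with he | he
        · exact absurd ((PySem.List.index?_isSome_iff order e).mp (by rw [hne]; rfl)) (hall e he)
        · simp at he; subst he; rw [hd] at hne; injection hne with h'; omega⟩
    · rw [hst]
      simp only
      by_cases hlt : (nd : Int) < (nb : Int)
      · rw [if_pos hlt]
        exact Or.inr ⟨d, nd, rfl, List.mem_append_right _ (List.mem_singleton.mpr rfl), hd, by
          intro e he ne hne
          rcases List.mem_append.mp he with he | he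
          · have := hmin e he ne hne; omega
          · simp at he; subst he; rw [hd] at hne; injection hne with h'; omega⟩
      · rw [if_neg hlt]
        exact Or.inr ⟨b, nb, rfl, List.mem_append_left _ hb, hib, by
          intro e he ne hne
          rcases List.mem_append.mp he with he | he
          · exact hmin e he ne hne
          · simp at he; subst he; rw [hd] at hne; injection hne with h'; omega⟩

lemma best_inv (order : List String) :
    ∀ (sd seen : List String) (st : Option String × Option Int), pvInv order seen st →
    pvInv order (seen ++ sd) (sd.foldl (pvBestStep (pvRank order)) st) := by
  intro sd
  induction sd with
  | nil => intro seen st h; simpa using h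
  | cons d rest ih =>
    intro seen st h
    rw [List.foldl_cons]
    have := ih (seen ++ [d]) _ (best_step_inv order seen st d h)
    simpa using this

-- A's loop when no shot department occurs in the order
lemma findFirst_of_disjoint (order sd : List String) (h : ∀ x ∈ sd, x ∉ order) :
    pvFindFirst order sd = sd.head? := by
  induction order with
  | nil => rfl
  | cons d rest ih =>
    simp only [pvFindFirst]
    have : sd.contains d = false := by
      by_contra hc
      simp only [Bool.not_eq_false, List.contains_eq_mem, decide_eq_true_eq] at hc
      exact h d hc (List.mem_cons_self)
    rw [this]
    simp only [Bool.false_eq_true, if_false]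
    exact ih (fun x hx hmem => h x hx (List.mem_cons_of_mem _ hmem))

-- A's loop returns the shot department with minimal first index in the order
lemma findFirst_min (order : List String) :
    ∀ (sd : List String) (x : String), x ∈ sd → x ∈ order →
    ∃ d nd, pvFindFirst order sd = some d ∧ d ∈ sd ∧
      PySem.List.index? order d = some nd ∧
      ∀ e ∈ sd, ∀ ne, PySem.List.index? order e = some ne → nd ≤ ne := by
  induction order with
  | nil => intro sd x hx hxo; cases hxo
  | cons h t ih =>
    intro sd x hx hxo
    by_cases hc : sd.contains h
    · refine ⟨h, 0, ?_, ?_, PySem.List.index?_cons_self h t, fun e he ne hne => Nat.zero_le ne⟩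
      · simp only [pvFindFirst, hc, if_true]
      · simpa using hc
    · have hhsd : h ∉ sd := by simpa using hc
      have hxt : x ∈ t := by
        rcases List.mem_cons.mp hxo with h' | h'
        · exact absurd hx (h' ▸ hhsd)
        · exact h'
      obtain ⟨d, nd, hff, hd, hid, hmin⟩ := ih sd x hx hxt
      refine ⟨d, nd + 1, ?_, hd, ?_, ?_⟩
      · simp only [pvFindFirst, hc, Bool.false_eq_true, if_false, hff]
      · rw [PySem.List.index?_cons_of_ne t (fun e => hhsd (by rw [e]; exact hd)), hid]; rfl
      · intro e he ne hne
        have hne' : h ≠ e := fun e' => hhsd (e' ▸ he)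
        rw [PySem.List.index?_cons_of_ne t hne'] at hne
        cases hie : PySem.List.index? t e with
        | none => rw [hie] at hne; cases hne
        | some m =>
          rw [hie] at hne
          simp only [Option.map_some, Option.some.injEq] at hne
          subst hne
          have := hmin e he m hie
          omega

-- ===== VERDICT (by name: the statement is the Claim_ definition above) =====
theorem get_source_department_spec : Claim_equal_get_source_department := by
  unfold Claim_equal_get_source_department
  intro inputs order _ hpre
  unfold Spec_get_source_department
  unfold get_source_department get_source_department_alt
  have hs : (pvShotDepts? inputs).isSome := shotDepts_isSome inputs hpre
  cases hsd : pvShotDepts? inputs with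
  | none => simp [hsd] at hs
  | some sd =>
    change (if sd.isEmpty = true then none else pvFindFirst order sd) =
      (if sd.isEmpty = true then none else
        (match (List.foldl (pvBestStep (pvRank order)) (none, none) sd).1 with
        | some b => some b
        | none => sd.head?))
    by_cases hemp : sd.isEmpty
    · rw [if_pos hemp, if_pos hemp]
    · rw [if_neg hemp, if_neg hemp]
      have hinv := best_inv order sd [] (none, none) (Or.inl ⟨rfl, by simp⟩)
      simp only [List.nil_append] at hinv
      by_cases hex : ∃ x ∈ sd, x ∈ order
      · obtain ⟨x, hx, hxo⟩ := hex
        obtain ⟨d, nd, hff, hd, hid, hmin⟩ := findFirst_min order sd x hx hxo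
        rcases hinv with ⟨hst, hall⟩ | ⟨b, nb, hst, hb, hib, hmin'⟩
        · exact absurd hxo (hall x hx)
        · rw [hff, hst]
          simp only
          have hnd : nd = nb := le_antisymm (hmin b hb nb hib) (hmin' d hd nd hid)
          subst hnd
          obtain ⟨hk, hget, _⟩ := PySem.List.getElem_of_index?_eq_some hid
          obtain ⟨hk', hget', _⟩ := PySem.List.getElem_of_index?_eq_some hib
          rw [← hget, ← hget']
      · push Not at hex
        rw [findFirst_of_disjoint order sd hex]
        rcases hinv with ⟨hst, _⟩ | ⟨b, nb, hst, hb, hib, _⟩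
        · rw [hst]
        · exact absurd ((PySem.List.index?_isSome_iff order b).mp (by rw [hib]; rfl)) (hex b hb)
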